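-- pv_equiv track=rewrite | github.com/antoniohdez/Minimos-Cuadrados | main.py | calculaOrden
-- ===== SOURCE A (Python) =====
-- def calculaOrden(datos):
-- 	orden = 0
-- 	numVal = len(datos) #numero de valores de deltaY
-- 	valoresY = []
-- 	for i in range(len(datos)):
-- 		valoresY.append(datos[i][1])
--
-- 	while numVal > 0:
-- 		flag = True
-- 		for i in range(len(valoresY)-1):
-- 			valoresY[i] = valoresY[i+1] - valoresY[i]
-- 		valoresY.pop(len(valoresY)-1)
-- 		for i in range(len(valoresY)-1):
-- 			if valoresY[i] != valoresY[i+1]: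
-- 				flag = False
-- 		numVal -= 1
-- 		orden += 1
-- 		if flag:
-- 			return orden
-- 	return orden
-- ===== SOURCE B (Python) =====
-- def calculaOrden(datos):
--     vals = [d[1] for d in datos]
--     if not vals:
--         return 0
--     return _helper(vals, 0)
--
--
-- def _helper(vals, order):
--     diffs = [vals[i + 1] - vals[i] for i in range(len(vals) - 1)]
--     order += 1
--     if len(diffs) <= 1 or all(d == diffs[0] for d in diffs):
--         return order
--     return _helper(diffs, order)
-- ===== Notes on version B (the rewrite author's own statement) =====
-- stated objective: simpler
-- what changed: Replaces A's fuel-counted while loop that mutates valoresY in place (forward difference pass, pop of the last element, adjacent-pair flag scan) by a direct recursion on the freshly built difference list with an all-equal-to-first test, stopping when the differences are constant.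
-- outside the precondition, e.g. on calculaOrden([[1], [2]]): A raises IndexError, B raises IndexError
import Mathlib
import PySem

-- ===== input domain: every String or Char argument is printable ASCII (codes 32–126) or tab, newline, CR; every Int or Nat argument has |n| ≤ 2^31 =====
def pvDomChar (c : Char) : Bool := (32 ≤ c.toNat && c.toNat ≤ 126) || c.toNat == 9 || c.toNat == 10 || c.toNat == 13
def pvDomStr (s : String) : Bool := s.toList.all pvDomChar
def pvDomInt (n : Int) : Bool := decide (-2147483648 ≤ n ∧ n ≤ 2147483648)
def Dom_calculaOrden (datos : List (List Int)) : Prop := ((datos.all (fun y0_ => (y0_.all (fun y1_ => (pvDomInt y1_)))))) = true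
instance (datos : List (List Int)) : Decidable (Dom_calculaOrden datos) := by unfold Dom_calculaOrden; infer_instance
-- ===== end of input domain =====

-- B replaces A's fuel-counted in-place while loop by a direct recursion on the shrinking
-- difference list with an all-equal-to-first test (objective: simpler decomposition, same cost).

-- ===== PORT A =====
-- valoresY.append(datos[i][1]) loop; row[1] via pyGetD, exact under Pre_ (2 ≤ row.length)
def pvBuildY (datos : List (List Int)) : List Int :=
  datos.foldl (fun acc row => acc ++ [PySem.List.pyGetD row 1 0]) []

-- the forward in-place pass 'valoresY[i] = valoresY[i+1] - valoresY[i]' followed by the pop of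
-- the last element: each y[i+1] read is the ORIGINAL value (updated only later), so the pass
-- produces exactly these values in this order
def pvDiffPass : List Int → List Int
  | a :: b :: t => (b - a) :: pvDiffPass (b :: t)
  | _ => []

-- the scan 'for i …: if y[i] != y[i+1]: flag = False' — flag stays false once cleared
def pvFlag : List Int → Bool
  | a :: b :: t => (a == b) && pvFlag (b :: t)
  | _ => true

-- the while loop, with numVal as the explicit counter
def pvALoop : List Int → Nat → Int → Int
  | _, 0, orden => orden
  | ys, Nat.succ n, orden =>
    let ys' := pvDiffPass ys
    let flag := pvFlag ys'
    if flag then orden + 1 else pvALoop ys' n (orden + 1)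

def calculaOrden (datos : List (List Int)) : Int :=
  let valoresY := pvBuildY datos
  pvALoop valoresY datos.length 0

-- ===== PORT B =====
-- [vals[i+1] - vals[i] for i in range(len(vals)-1)]; every index is in range, so getD is exact
def pvBDiffs (vals : List Int) : List Int :=
  (List.range (vals.length - 1)).map (fun i => vals.getD (i + 1) 0 - vals.getD i 0)

theorem pvBDiffs_length (vals : List Int) : (pvBDiffs vals).length = vals.length - 1 := by
  simp [pvBDiffs]

def pvBHelper (vals : List Int) (order : Int) : Int :=
  let diffs := pvBDiffs vals
  if h : diffs.length ≤ 1 ∨ diffs.all (fun d => d == diffs.headD 0) = true then order + 1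
  else pvBHelper diffs (order + 1)
termination_by vals.length
decreasing_by
  have h1 : ¬ (pvBDiffs vals).length ≤ 1 := fun hh => h (Or.inl hh)
  have h2 := pvBDiffs_length vals
  omega

def calculaOrden_alt (datos : List (List Int)) : Int :=
  let vals := datos.map (fun d => PySem.List.pyGetD d 1 0)
  if vals = [] then 0 else pvBHelper vals 0

-- ===== PRECONDITION & SPEC =====
-- Pre_ excludes inputs with a row of fewer than two entries, on which A (and B) raise IndexError
def Pre_calculaOrden (datos : List (List Int)) : Prop := ∀ row ∈ datos, 2 ≤ row.length
instance (datos : List (List Int)) : Decidable (Pre_calculaOrden datos) := by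
  unfold Pre_calculaOrden; infer_instance
def pvWitness_calculaOrden : List (List Int) := [[0, 1], [1, 4], [2, 9]]

def Spec_calculaOrden (datos : List (List Int)) (out : Int) : Prop := out = calculaOrden_alt datos
instance (datos : List (List Int)) (out : Int) : Decidable (Spec_calculaOrden datos out) := by unfold Spec_calculaOrden; infer_instance

-- ===== CLAIM (what is proved, stated in full; the proofs are below) =====
def Claim_equal_calculaOrden : Prop := ∀ (datos : List (List Int)), Dom_calculaOrden datos → Pre_calculaOrden datos → Spec_calculaOrden datos (calculaOrden datos)

-- ===== LEMMAS AND PROOFS =====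

theorem pvBuildY_aux (g : List Int → Int) (acc : List Int) (l : List (List Int)) :
    l.foldl (fun acc row => acc ++ [g row]) acc = acc ++ l.map g := by
  induction l generalizing acc with
  | nil => simp
  | cons x xs ih => simp [ih]

theorem pvBuildY_eq (datos : List (List Int)) :
    pvBuildY datos = datos.map (fun d => PySem.List.pyGetD d 1 0) := by
  unfold pvBuildY
  exact (pvBuildY_aux (fun row => PySem.List.pyGetD row 1 0) [] datos).trans (List.nil_append _)

theorem pvDiffPass_eq (ys : List Int) : pvDiffPass ys = pvBDiffs ys := by
  induction ys using pvDiffPass.induct with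
  | case1 a b t ih =>
    simp only [pvDiffPass, ih, pvBDiffs]
    simp [List.range_succ_eq_map, List.map_map, Function.comp]
  | case2 ys h1 => cases ys with
    | nil => rfl
    | cons a t => cases t with
      | nil => rfl
      | cons b t2 => exact absurd rfl (h1 a b t2)

theorem pvFlag_allHead (l : List Int) : pvFlag l = l.all (fun d => d == l.headD 0) := by
  induction l with
  | nil => rfl
  | cons a t ih =>
    cases t with
    | nil => simp [pvFlag]
    | cons b t2 =>
      by_cases hab : a = b
      · subst hab; simp [pvFlag] at ih ⊢; exact ih
      · have h1 : (a == b) = false := by simp [hab]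
        have h2 : (b == a) = false := by simp [Ne.symm hab]
        simp [pvFlag, h1, h2]

theorem pvCond_iff (l : List Int) :
    (l.length ≤ 1 ∨ l.all (fun d => d == l.headD 0) = true) ↔ pvFlag l = true := by
  rw [pvFlag_allHead]
  constructor
  · rintro (h | h)
    · match l, h with
      | [], _ => rfl
      | [a], _ => simp
    · exact h
  · exact Or.inr

theorem pvMain : ∀ (n : Nat) (ys : List Int) (orden : Int), ys.length = n → ys ≠ [] →
    pvALoop ys n orden = pvBHelper ys orden := by
  intro n
  induction n using Nat.strong_induction_on with
  | _ n ih =>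
    intro ys orden hlen hne
    match n, hlen with
    | 0, hlen => exact absurd (List.eq_nil_of_length_eq_zero hlen) hne
    | Nat.succ m, hlen =>
      rw [pvBHelper]
      simp only [pvALoop, pvDiffPass_eq]
      by_cases hf : pvFlag (pvBDiffs ys) = true
      · rw [if_pos hf, dif_pos ((pvCond_iff _).mpr hf)]
      · have hcond := (fun h => hf ((pvCond_iff _).mp h))
        rw [if_neg (by simpa using hf), dif_neg hcond]
        have hlen' : (pvBDiffs ys).length = m := by
          have := pvBDiffs_length ys; omega
        have hne' : pvBDiffs ys ≠ [] := by
          intro hnil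
          exact hf (by rw [hnil]; rfl)
        exact ih m (Nat.lt_succ_self m) _ _ hlen' hne'

-- ===== VERDICT (by name: the statement is the Claim_ definition above) =====
theorem calculaOrden_spec : Claim_equal_calculaOrden := by
  intro datos _dom _pre
  unfold Spec_calculaOrden calculaOrden calculaOrden_alt
  rw [pvBuildY_eq]
  cases hd : datos with
  | nil => rfl
  | cons r rs =>
    rw [if_neg (by simp)]
    exact pvMain (r :: rs).length _ 0 (by simp) (by simp)
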